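-- pv_equiv track=rewrite | github.com/MIMPython/MIMPython2023-Assignment | assignment_module02/module02_student04_TranNgocHieu/module02_assignment14_student04_TranNgocHieu.py | page_to_num_2
-- ===== SOURCE A (Python) =====
-- def page_to_num_2(page):
--     """
--     Cách 2: Như bài toán tiểu học
--     """
--     pow = len(str(page))
--     if pow == 1:
--         return page
--     else:
--         num = 9 # Bắt đầu đếm từ trang 10.
--     for i in range(1, pow - 1):
--         num += (10**(i + 1) - 10**i) * (i + 1)
--     num += (int(page) - 10**(pow - 1) + 1) * pow
--     return num
-- ===== SOURCE B (Python) =====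
-- def page_to_num_2(page):
--     d = len(str(page))
--     return d * (page + 1) - (10 ** d - 1) // 9
-- ===== Notes on version B (the rewrite author's own statement) =====
-- stated objective: simpler
-- what changed: Replaces the digit-width grouping loop with a loop-free closed form: d*(page+1) minus the d-digit repunit, where d = len(str(page)).
import Mathlib
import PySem

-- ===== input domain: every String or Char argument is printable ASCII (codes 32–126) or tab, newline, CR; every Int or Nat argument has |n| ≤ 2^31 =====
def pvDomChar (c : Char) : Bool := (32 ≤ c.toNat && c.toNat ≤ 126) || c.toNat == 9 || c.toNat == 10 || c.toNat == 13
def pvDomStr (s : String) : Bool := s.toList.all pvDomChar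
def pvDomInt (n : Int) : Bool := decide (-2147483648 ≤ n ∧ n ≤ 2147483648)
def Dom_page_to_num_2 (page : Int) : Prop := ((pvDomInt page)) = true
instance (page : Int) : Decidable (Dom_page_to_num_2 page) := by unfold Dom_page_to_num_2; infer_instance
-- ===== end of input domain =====

-- B replaces A's digit-width grouping loop by the loop-free closed form
-- d*(page+1) - (10^d - 1)//9 with d = len(str(page)); equal return values are proved below.

-- ===== PORT A =====
def page_to_num_2 (page : Int) : Int :=
  let pow : Int := PySem.Str.len (PySem.Int.toStr page)
  if pow = 1 then page
  else
    let num : Int := 9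
    let num := (PySem.List.pyRange 1 (pow - 1) 1).foldl
      (fun num i => num + (10 ^ (i + 1).toNat - 10 ^ i.toNat) * (i + 1)) num
    num + (page - 10 ^ (pow - 1).toNat + 1) * pow

-- ===== PORT B =====
def page_to_num_2_alt (page : Int) : Int :=
  let d : Int := PySem.Str.len (PySem.Int.toStr page)
  d * (page + 1) - PySem.Int.floordiv (10 ^ d.toNat - 1) 9

-- ===== PRECONDITION & SPEC =====
def Spec_page_to_num_2 (page : Int) (out : Int) : Prop := out = page_to_num_2_alt page
instance (page : Int) (out : Int) : Decidable (Spec_page_to_num_2 page out) := by unfold Spec_page_to_num_2; infer_instance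

-- ===== CLAIM (what is proved, stated in full; the proofs are below) =====
def Claim_equal_page_to_num_2 : Prop := ∀ (page : Int), Dom_page_to_num_2 page → Spec_page_to_num_2 page (page_to_num_2 page)

-- ===== LEMMAS AND PROOFS =====

-- ===== VERDICT (by name: the statement is the Claim_ definition above) =====
-- repunit: R d = 11…1 (d ones)
def pvRep : Nat → Int
  | 0 => 0
  | d + 1 => 10 * pvRep d + 1

lemma pvRep_nine : ∀ d : Nat, 9 * pvRep d = 10 ^ d - 1 := by
  intro d
  induction d with
  | zero => simp [pvRep]
  | succ k ih => simp [pvRep, pow_succ]; ring_nf; ring_nf at ih; omega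

lemma pvRep_fdiv (d : Nat) : PySem.Int.floordiv (10 ^ d - 1) 9 = pvRep d := by
  rw [← pvRep_nine d, PySem.Int.floordiv_eq_ediv_of_pos (by norm_num)]
  exact Int.mul_ediv_cancel_left _ (by norm_num)

-- the loop of A, evaluated in closed form: running i = 1 .. k gives the
-- digit count of 1 .. 10^(k+1) - 1, which is (k+2)·10^(k+1) - R(k+2)
lemma pvLoop (k : Nat) :
    (PySem.List.pyRange 1 ((k : Int) + 1) 1).foldl
      (fun num i => num + (10 ^ (i + 1).toNat - 10 ^ i.toNat) * (i + 1)) 9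
    = ((k : Int) + 2) * 10 ^ (k + 1) - pvRep (k + 2) := by
  induction k with
  | zero =>
    rw [PySem.List.pyRange_one_eq_nil (by norm_num)]
    simp [pvRep]
  | succ m ih =>
    have h1 : ((m + 1 : Nat) : Int) + 1 = ((m : Int) + 1) + 1 := by push_cast; ring
    rw [h1, PySem.List.pyRange_one_succ_right (by omega),
        List.foldl_append, ih]
    simp only [List.foldl_cons, List.foldl_nil]
    have h2 : ((m : Int) + 1 + 1).toNat = m + 2 := by omega
    have h3 : ((m : Int) + 1).toNat = m + 1 := by omega
    rw [h2, h3]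
    have hr : pvRep (m + 3) = 10 * pvRep (m + 2) + 1 := rfl
    have h9 := pvRep_nine (m + 2)
    push_cast
    rw [hr]
    ring_nf
    ring_nf at h9
    nlinarith [h9]

-- str(page) is never empty, so pow ≥ 1
lemma pvLen_pos (page : Int) : 1 ≤ PySem.Str.len (PySem.Int.toStr page) := by
  rw [PySem.Str.len_eq, PySem.Int.toList_toStr]
  have : PySem.Int.toChars page ≠ [] := by
    unfold PySem.Int.toChars
    split
    · simp
    · exact List.ne_nil_of_length_pos Nat.length_toDigits_pos
  have := List.length_pos_of_ne_nil this
  omega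

-- ===== VERDICT (by name: the statement is the Claim_ definition above) =====
theorem page_to_num_2_spec : Claim_equal_page_to_num_2 := by
  intro page _
  show page_to_num_2 page = page_to_num_2_alt page
  have hpos := pvLen_pos page
  simp only [page_to_num_2, page_to_num_2_alt]
  set L : Int := PySem.Str.len (PySem.Int.toStr page) with hLdef
  by_cases h1 : L = 1
  · simp [h1]
  · simp only [if_neg h1]
    obtain ⟨k, hk⟩ : ∃ k : Nat, L = (k : Int) + 2 := by
      refine ⟨(L - 2).toNat, ?_⟩; omega
    have hL1 : L - 1 = (k : Int) + 1 := by omega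
    have hLt : ((k : Int) + 1).toNat = k + 1 := by omega
    have hLd : L.toNat = k + 2 := by omega
    rw [hL1, hLt, hLd, pvLoop k, pvRep_fdiv (k + 2), hk]
    ring
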